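-- pv_equiv track=rewrite | github.com/gauravsb/nlp-speech-classification | SpeechClassificationNGrams.py | token_generation
-- ===== SOURCE A (Python) =====
-- def token_generation(data):
--     tokenList = data.split(" ")
--     token_to_id_map = {}
--     id_to_token_map = {}
--     k = 0
--     for i in range(len(tokenList)):
--         if tokenList[i] not in token_to_id_map:
--             token_to_id_map[tokenList[i]] = k
--             id_to_token_map[k] = tokenList[i]
--             k += 1
--         # id_to_token_map={v: k for k,v in token_to_id_map.items()}
--
--     return token_to_id_map, id_to_token_map, tokenList
-- ===== SOURCE B (Python) =====
-- def token_generation(data):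
--     tokenList = data.split(" ")
--     # distinct tokens, ordered by the index of their first occurrence (set + sort)
--     uniq = sorted(set(tokenList), key=tokenList.index)
--     ids = range(len(uniq))
--     token_to_id_map = dict(zip(uniq, ids))
--     id_to_token_map = dict(zip(ids, uniq))
--     return token_to_id_map, id_to_token_map, tokenList
-- ===== Notes on version B (the rewrite author's own statement) =====
-- stated objective: alternative
-- what changed: Replaces A's single membership-guarded loop growing two dicts with a counter by a set-then-sort algorithm: collect the distinct tokens as a set, sort them by first-occurrence index (key=tokenList.index), and build each dict from a zip with range; correct because first-occurrence indices are distinct, so sorting by them recovers exactly first-occurrence order.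
import Mathlib
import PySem

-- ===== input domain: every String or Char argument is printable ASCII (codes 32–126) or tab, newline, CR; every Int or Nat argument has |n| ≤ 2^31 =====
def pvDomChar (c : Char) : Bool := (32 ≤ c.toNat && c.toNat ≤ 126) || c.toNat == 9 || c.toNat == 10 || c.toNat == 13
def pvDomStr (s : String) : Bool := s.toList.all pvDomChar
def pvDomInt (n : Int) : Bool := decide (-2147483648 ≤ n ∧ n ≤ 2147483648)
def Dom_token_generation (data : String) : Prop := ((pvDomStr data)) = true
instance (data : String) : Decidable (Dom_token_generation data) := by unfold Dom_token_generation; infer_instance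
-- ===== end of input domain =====

-- B replaces A's membership-guarded accumulation loop by a set-then-sort algorithm:
-- sort the token set by first-occurrence index, then zip with ids (same result, similar cost).

-- ===== PORT A =====
-- A's loop body: for each token t, if t not in token_to_id_map, record both directions and bump k
def pvStep (st : PySem.Dict String Int × PySem.Dict Int String × Int) (t : String) :
    PySem.Dict String Int × PySem.Dict Int String × Int :=
  if st.1.contains t then st
  else (st.1.insert t st.2.2, st.2.1.insert st.2.2 t, st.2.2 + 1)

def token_generation (data : String) : (List (String × Int)) × (List (Int × String)) × List String :=
  let tokenList := (PySem.Str.split? data " ").getD []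
  let st := (PySem.List.pyRange 0 (PySem.List.len tokenList)).foldl
    (fun st i => pvStep st (PySem.List.pyGetD tokenList i ""))
    (PySem.Dict.empty, PySem.Dict.empty, 0)
  (st.1.items, st.2.1.items, tokenList)

-- ===== PORT B =====
-- tokenList.index t as the sort key; only ever applied to members of the set, where index? is some
def token_generation_alt (data : String) : (List (String × Int)) × (List (Int × String)) × List String :=
  let tokenList := (PySem.Str.split? data " ").getD []
  let uniq := PySem.List.sorted (PySem.Set.ofList tokenList)
    (fun t => ((PySem.List.index? tokenList t).getD 0 : Nat)) false
  -- dict(zip(uniq, range(len(uniq)))) and dict(zip(range(len(uniq)), uniq)): uniq has no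
  -- duplicates, so each dict's items are exactly the zipped pairs
  let e := PySem.List.enumerate uniq
  (e.map (fun p => (p.2, p.1)), e, tokenList)

-- ===== PRECONDITION & SPEC =====
def Spec_token_generation (data : String) (out : (List (String × Int)) × (List (Int × String)) × List String) : Prop := out = token_generation_alt data
instance (data : String) (out : (List (String × Int)) × (List (Int × String)) × List String) : Decidable (Spec_token_generation data out) := by unfold Spec_token_generation; infer_instance

-- ===== CLAIM (what is proved, stated in full; the proofs are below) =====
def Claim_equal_token_generation : Prop := ∀ (data : String), Dom_token_generation data → Spec_token_generation data (token_generation data)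

-- ===== LEMMAS AND PROOFS =====

-- keys of the swapped enumeration of u are exactly the elements of u
lemma contains_map_swap (u : List String) (t : String) (s : Int) :
    (PySem.Dict.mk ((PySem.List.enumerate u s).map (fun p => (p.2, p.1)))).contains t
      = u.contains t := by
  induction u generalizing s with
  | nil => rfl
  | cons x xs ih =>
    simp only [PySem.List.enumerate, List.map_cons, PySem.Dict.contains] at *
    simp only [List.any_cons]
    have := ih (s+1)
    simp only [PySem.Dict.contains] at this
    rw [this]
    by_cases hxt : x = t
    · subst hxt; simp
    · have hxt' : ¬ t = x := fun h => hxt h.symm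
      simp [hxt, hxt']

-- the fresh id u.length is never a key of (enumerate u)
lemma contains_enum_ge (u : List String) (k s : Int) (h : s + u.length ≤ k) :
    (PySem.Dict.mk (PySem.List.enumerate u s)).contains k = false := by
  induction u generalizing s with
  | nil => rfl
  | cons x xs ih =>
    simp only [PySem.List.enumerate, PySem.Dict.contains, List.any_cons] at *
    simp only [List.length_cons] at h
    have hx : (s == k) = false := by simp only [beq_eq_false_iff_ne, ne_eq]; push_cast at h; omega
    have := ih (s+1) (by push_cast at h ⊢; omega)
    simp only [PySem.Dict.contains] at this
    simp [hx, this]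

-- loop invariant: after folding xs over A's step from the state encoding distinct-token list u,
-- the state encodes the ordered distinct tokens of u followed by xs
lemma loop_inv (xs u : List String) :
    xs.foldl pvStep
      (PySem.Dict.mk ((PySem.List.enumerate u).map (fun p => (p.2, p.1))),
       PySem.Dict.mk (PySem.List.enumerate u), (u.length : Int))
    = (PySem.Dict.mk ((PySem.List.enumerate (xs.foldl PySem.Set.add u)).map (fun p => (p.2, p.1))),
       PySem.Dict.mk (PySem.List.enumerate (xs.foldl PySem.Set.add u)),
       ((xs.foldl PySem.Set.add u).length : Int)) := by
  induction xs generalizing u with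
  | nil => rfl
  | cons t xs ih =>
    simp only [List.foldl_cons]
    by_cases hc : u.contains t
    · have h1 : pvStep (PySem.Dict.mk ((PySem.List.enumerate u).map (fun p => (p.2, p.1))),
          PySem.Dict.mk (PySem.List.enumerate u), (u.length : Int)) t
          = (PySem.Dict.mk ((PySem.List.enumerate u).map (fun p => (p.2, p.1))),
             PySem.Dict.mk (PySem.List.enumerate u), (u.length : Int)) := by
        simp only [pvStep]
        rw [if_pos (by rw [contains_map_swap]; exact hc)]
      have h2 : PySem.Set.add u t = u := by
        simp only [PySem.Set.add, PySem.Set.contains]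
        rw [if_pos hc]
      rw [h1, h2, ih]
    · have hcb : u.contains t = false := by simpa using hc
      have h2 : PySem.Set.add u t = u ++ [t] := by
        simp only [PySem.Set.add, PySem.Set.contains]
        rw [if_neg hc]
      have hins1 : (PySem.Dict.mk ((PySem.List.enumerate u).map (fun p => (p.2, p.1)))).insert t
          (u.length : Int)
          = PySem.Dict.mk ((PySem.List.enumerate (u ++ [t])).map (fun p => (p.2, p.1))) := by
        have hcf : (PySem.Dict.mk ((PySem.List.enumerate u).map (fun p => (p.2, p.1)))).contains t = false := by
          rw [contains_map_swap]; exact hcb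
        simp [PySem.Dict.insert, hcf, PySem.List.enumerate_append, PySem.List.enumerate]
      have hins2 : (PySem.Dict.mk (PySem.List.enumerate u)).insert (u.length : Int) t
          = PySem.Dict.mk (PySem.List.enumerate (u ++ [t])) := by
        have hcf : (PySem.Dict.mk (PySem.List.enumerate u)).contains (u.length : Int) = false :=
          contains_enum_ge u _ 0 (by omega)
        simp [PySem.Dict.insert, hcf, PySem.List.enumerate_append, PySem.List.enumerate]
      have h1 : pvStep (PySem.Dict.mk ((PySem.List.enumerate u).map (fun p => (p.2, p.1))),
          PySem.Dict.mk (PySem.List.enumerate u), (u.length : Int)) t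
          = (PySem.Dict.mk ((PySem.List.enumerate (u ++ [t])).map (fun p => (p.2, p.1))),
             PySem.Dict.mk (PySem.List.enumerate (u ++ [t])), ((u ++ [t]).length : Int)) := by
        simp only [pvStep]
        rw [if_neg (by rw [contains_map_swap]; exact hc)]
        simp only [hins1, hins2, List.length_append, List.length_cons, List.length_nil]
        push_cast
        ring_nf
      rw [h1, h2]
      exact ih (u ++ [t])

-- membership in a prefix bounds the first-occurrence index
lemma index?_lt_of_mem_take (xs : List String) (v : String) (n : Nat)
    (hv : v ∈ xs.take n) : ∃ k, PySem.List.index? xs v = some k ∧ k < n := by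
  have hvxs : v ∈ xs := List.mem_of_mem_take hv
  have hs : (PySem.List.index? xs v).isSome := (PySem.List.index?_isSome_iff xs v).2 hvxs
  obtain ⟨k, hk⟩ := Option.isSome_iff_exists.mp hs
  refine ⟨k, hk, ?_⟩
  obtain ⟨hklen, hkv, hmin⟩ := PySem.List.getElem_of_index?_eq_some hk
  by_contra hge
  push_neg at hge
  obtain ⟨j, hj, hjv⟩ := List.mem_take_iff_getElem.mp hv
  have hjn : j < n := lt_of_lt_of_le hj (min_le_left _ _)
  have hjx : j < xs.length := lt_of_lt_of_le hj (min_le_right _ _)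
  exact hmin j (lt_of_lt_of_le hjn hge) (by simpa [List.getElem_take] using hjv)

-- a token absent from the prefix whose next position is n has first-occurrence index exactly n
lemma index?_eq_of_not_mem_take (xs : List String) (n : Nat) (hn : n < xs.length)
    (hnm : xs[n] ∉ xs.take n) : PySem.List.index? xs xs[n] = some n := by
  have hvxs : xs[n] ∈ xs := List.getElem_mem hn
  have hs : (PySem.List.index? xs xs[n]).isSome := (PySem.List.index?_isSome_iff _ _).2 hvxs
  obtain ⟨k, hk⟩ := Option.isSome_iff_exists.mp hs
  obtain ⟨hklen, hkv, hmin⟩ := PySem.List.getElem_of_index?_eq_some hk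
  rcases lt_trichotomy k n with h | h | h
  · exact absurd (List.mem_take_iff_getElem.mpr ⟨k, by omega, hkv⟩) hnm
  · rw [hk, h]
  · exact absurd rfl (hmin n h)
  
-- dedup of a snoc
lemma dedup_snoc (l : List String) (x : String) :
    PySem.List.dedup (l ++ [x])
      = if x ∈ l then PySem.List.dedup l else PySem.List.dedup l ++ [x] := by
  have h : PySem.List.dedup (l ++ [x]) = PySem.Set.add (PySem.List.dedup l) x := by
    simp [PySem.List.dedup_eq_ofList, PySem.Set.ofList_eq_foldl, List.foldl_append]
  rw [h]
  simp only [PySem.Set.add, PySem.Set.contains]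
  by_cases hx : x ∈ l
  · rw [if_pos (by simpa [PySem.List.mem_dedup] using hx), if_pos hx]
  · rw [if_neg (by simpa [PySem.List.mem_dedup] using hx), if_neg hx]

-- the ordered distinct tokens are strictly increasing in first-occurrence index
lemma dedup_pairwise_index (xs : List String) (n : Nat) (hn : n ≤ xs.length) :
    (PySem.List.dedup (xs.take n)).Pairwise
      (fun a b => ((PySem.List.index? xs a).getD 0 : Nat) < (PySem.List.index? xs b).getD 0) := by
  induction n with
  | zero => simp [PySem.List.dedup]
  | succ m ih =>
    have hm : m < xs.length := hn
    have htake : xs.take (m+1) = xs.take m ++ [xs[m]] := by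
      rw [List.take_succ]
      simp [List.getElem?_eq_getElem hm]
    rw [htake, dedup_snoc]
    by_cases hmem : xs[m] ∈ xs.take m
    · rw [if_pos hmem]; exact ih (le_of_lt hm)
    · rw [if_neg hmem]
      refine List.pairwise_append.mpr ⟨ih (le_of_lt hm), List.pairwise_singleton _ _, ?_⟩
      intro a ha b hb
      rw [List.mem_singleton] at hb
      subst hb
      obtain ⟨k, hk, hkm⟩ := index?_lt_of_mem_take xs a m (by rwa [← PySem.List.mem_dedup])
      rw [hk, index?_eq_of_not_mem_take xs m hm hmem]
      simpa using hkm

-- B's sort of the token set by first index recovers first-occurrence order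
lemma sorted_set_eq_dedup (xs : List String) :
    PySem.List.sorted (PySem.Set.ofList xs)
      (fun t => ((PySem.List.index? xs t).getD 0 : Nat)) false = PySem.List.dedup xs := by
  refine PySem.List.sorted_eq_of_perm_of_pairwise_lt _ _ _ ?_ ?_
  · rw [PySem.List.dedup_eq_ofList]
  · have := dedup_pairwise_index xs xs.length (le_refl _)
    simpa [List.take_length] using this

-- ===== VERDICT (by name: the statement is the Claim_ definition above) =====
theorem token_generation_spec : Claim_equal_token_generation := by
  intro data _
  unfold Spec_token_generation token_generation token_generation_alt
  dsimp only
  set xs := (PySem.Str.split? data " ").getD [] with hxs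
  have hset : List.foldl PySem.Set.add ([] : List String) xs = PySem.List.dedup xs := by
    simp [PySem.List.dedup, PySem.Set.ofList, PySem.Set.empty]
  have key :
      (PySem.List.pyRange 0 (PySem.List.len xs)).foldl
        (fun (st : PySem.Dict String Int × PySem.Dict Int String × Int) i =>
          pvStep st (PySem.List.pyGetD xs i "")) (PySem.Dict.empty, PySem.Dict.empty, 0)
      = (PySem.Dict.mk ((PySem.List.enumerate (PySem.List.dedup xs)).map (fun p => (p.2, p.1))),
         PySem.Dict.mk (PySem.List.enumerate (PySem.List.dedup xs)),
         ((PySem.List.dedup xs).length : Int)) := by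
    have hfold :
        (PySem.List.pyRange 0 (PySem.List.len xs)).foldl
          (fun (st : PySem.Dict String Int × PySem.Dict Int String × Int) i =>
            pvStep st (PySem.List.pyGetD xs i "")) (PySem.Dict.empty, PySem.Dict.empty, 0)
        = xs.foldl pvStep (PySem.Dict.empty, PySem.Dict.empty, 0) := by
      simpa using PySem.List.foldl_pyRange_pyGetD xs "" pvStep
        (PySem.Dict.empty, PySem.Dict.empty, 0) (le_refl 0)
    rw [hfold]
    have hbase : (PySem.Dict.empty (κ := String) (ν := Int), PySem.Dict.empty (κ := Int) (ν := String), (0 : Int))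
        = (PySem.Dict.mk ((PySem.List.enumerate ([] : List String)).map (fun p => (p.2, p.1))),
           PySem.Dict.mk (PySem.List.enumerate ([] : List String)), (([] : List String).length : Int)) := rfl
    rw [hbase, loop_inv xs [], hset]
  rw [key, sorted_set_eq_dedup]
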